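-- pv_equiv track=rewrite | github.com/sagemath/sage-archive-2023-02-01 | src/sage/combinat/multiset_partition_into_sets_ordered.py | _break_at_descents
-- ===== SOURCE A (Python) =====
-- def _break_at_descents(alpha, weak=True):
--     r"""
--     Return the deconcatenation of the composition ``alpha`` at its
--     set of descents.
--
--     OUTPUT:
--
--     A list `[a_1, \ldots, a_r]` of nonempty lists whose concatenation
--     is ``list(alpha)`` with the property that ``alpha[i] >= alpha[i+1]``
--     if and only if positions `i` and `i+1` correspond to different
--     lists. (Specifically, ``alpha[i]`` is the last letter of some
--     `a_j` and ``alpha[i+1]`` is the first letter of `a_{j+1}`.)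
--
--     If the optional argument ``weak`` is ``False``, then only make
--     breaks when ``alpha[i] > alpha[i+1]``.
--
--     EXAMPLES::
--
--         sage: from sage.combinat.multiset_partition_into_sets_ordered import _break_at_descents
--         sage: _break_at_descents([1, 2, 3, 2, 2, 1, 4, 3])
--         [[1, 2, 3], [2], [2], [1, 4], [3]]
--         sage: _break_at_descents([1, 2, 3, 2, 2, 1, 4, 3], weak=False)
--         [[1, 2, 3], [2, 2], [1, 4], [3]]
--         sage: _break_at_descents([])
--         []
--     """
--     if not alpha:
--         return []
--
--     Blocks = []
--     block = [alpha[0]]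
--     for i in range(1,len(alpha)):
--         if (alpha[i-1] > alpha[i]) or (alpha[i-1] == alpha[i] and weak):
--             Blocks.append(block)
--             block = [alpha[i]]
--         else:
--             block.append(alpha[i])
--     if block:
--         Blocks.append(block)
--     return Blocks
-- ===== SOURCE B (Python) =====
-- def _break_at_descents(alpha, weak=True):
--     alpha = list(alpha)
--     if not alpha:
--         return []
--     n = len(alpha)
--     breaks = [i for i in range(1, n)
--               if alpha[i - 1] > alpha[i] or (alpha[i - 1] == alpha[i] and weak)]
--     bounds = [0] + breaks + [n]
--     return [alpha[bounds[j]:bounds[j + 1]] for j in range(len(bounds) - 1)]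
-- ===== Notes on version B (the rewrite author's own statement) =====
-- stated objective: alternative
-- what changed: Instead of one stateful pass growing a current block and flushing it at each descent, B first computes the sorted list of break positions with a comprehension and then slices alpha at those boundaries.
import Mathlib
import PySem

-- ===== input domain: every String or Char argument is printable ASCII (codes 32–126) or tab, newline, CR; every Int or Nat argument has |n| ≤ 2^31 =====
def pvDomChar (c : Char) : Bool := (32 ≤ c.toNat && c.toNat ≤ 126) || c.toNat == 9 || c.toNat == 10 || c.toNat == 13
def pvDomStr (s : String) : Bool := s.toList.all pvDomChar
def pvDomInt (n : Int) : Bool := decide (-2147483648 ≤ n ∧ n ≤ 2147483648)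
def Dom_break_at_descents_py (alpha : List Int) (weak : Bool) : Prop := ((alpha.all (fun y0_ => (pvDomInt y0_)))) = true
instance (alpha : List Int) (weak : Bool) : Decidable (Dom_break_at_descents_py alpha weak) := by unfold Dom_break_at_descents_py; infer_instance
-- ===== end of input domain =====

-- B computes the break positions first and then slices alpha at those boundaries, instead of A's
-- stateful single pass that grows a current block and flushes it at each descent (same cost, different decomposition).

-- ===== PORT A =====
-- the loop 'for i in range(1, len(alpha))' as structural recursion over the tail,
-- carrying the state (Blocks, block); prev is alpha[i-1], x is alpha[i]
def breakGoA (weak : Bool) (Blocks : List (List Int)) (block : List Int) (prev : Int) :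
    List Int → List (List Int)
  | [] => if block = [] then Blocks else Blocks ++ [block]
  | x :: xs =>
    if prev > x || (prev == x && weak) then breakGoA weak (Blocks ++ [block]) [x] x xs
    else breakGoA weak Blocks (block ++ [x]) x xs

def break_at_descents_py (alpha : List Int) (weak : Bool) : List (List Int) :=
  match alpha with
  | [] => []
  | a0 :: rest => breakGoA weak [] [a0] a0 rest

-- ===== PORT B =====
def break_at_descents_py_alt (alpha : List Int) (weak : Bool) : List (List Int) :=
  if alpha = [] then []
  else
    let n : Int := (alpha.length : Int)
    let breaks : List Int := (PySem.List.pyRange 1 n 1).filter (fun i =>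
      PySem.List.pyGetD alpha (i - 1) 0 > PySem.List.pyGetD alpha i 0 ||
      (PySem.List.pyGetD alpha (i - 1) 0 == PySem.List.pyGetD alpha i 0 && weak))
    let bounds : List Int := 0 :: (breaks ++ [n])
    (PySem.List.pyRange 0 ((bounds.length : Int) - 1) 1).map (fun j =>
      PySem.List.slice alpha (some (PySem.List.pyGetD bounds j 0))
        (some (PySem.List.pyGetD bounds (j + 1) 0)))

-- ===== PRECONDITION & SPEC =====
def Spec_break_at_descents_py (alpha : List Int) (weak : Bool) (out : List (List Int)) : Prop := out = break_at_descents_py_alt alpha weak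
instance (alpha : List Int) (weak : Bool) (out : List (List Int)) : Decidable (Spec_break_at_descents_py alpha weak out) := by unfold Spec_break_at_descents_py; infer_instance

-- ===== CLAIM (what is proved, stated in full; the proofs are below) =====
def Claim_equal_break_at_descents_py : Prop := ∀ (alpha : List Int) (weak : Bool), Dom_break_at_descents_py alpha weak → Spec_break_at_descents_py alpha weak (break_at_descents_py alpha weak)

-- ===== LEMMAS AND PROOFS =====

-- the break condition, as both ports' branches compute it
def brkP (weak : Bool) (a b : Int) : Bool := a > b || (a == b && weak)

-- the common reference function: right-to-left recursive decomposition
def refF (weak : Bool) : List Int → List (List Int)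
  | [] => []
  | [x] => [[x]]
  | x :: y :: ys =>
    if brkP weak x y then [x] :: refF weak (y :: ys)
    else (x :: (refF weak (y :: ys)).headI) :: (refF weak (y :: ys)).tail

lemma refF_struct (w : Bool) (x : Int) (xs : List Int) :
    ∃ t r, refF w (x :: xs) = (x :: t) :: r := by
  cases xs with
  | nil => exact ⟨[], [], rfl⟩
  | cons y ys =>
    by_cases h : brkP w x y = true
    · exact ⟨[], refF w (y :: ys), by simp [refF, h]⟩
    · exact ⟨(refF w (y :: ys)).headI, (refF w (y :: ys)).tail, by simp [refF, h]⟩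

lemma breakGoA_eq (w : Bool) : ∀ (xs : List Int) (Blocks : List (List Int))
    (block : List Int) (prev : Int), block ≠ [] →
    breakGoA w Blocks block prev xs
      = Blocks ++ (block ++ (refF w (prev :: xs)).headI.tail) :: (refF w (prev :: xs)).tail := by
  intro xs
  induction xs with
  | nil => intro Blocks block prev h; simp [breakGoA, refF, h]
  | cons x xs ih =>
    intro Blocks block prev h
    have hcond : (decide (prev > x) || (prev == x && w)) = brkP w prev x := rfl
    by_cases hb : brkP w prev x = true
    · rw [breakGoA, hcond, if_pos hb, ih (Blocks ++ [block]) [x] x (by simp)]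
      obtain ⟨t, r, hs⟩ := refF_struct w x xs
      simp [refF, hb, hs]
    · rw [breakGoA, hcond, if_neg hb, ih Blocks (block ++ [x]) x (by simp)]
      obtain ⟨t, r, hs⟩ := refF_struct w x xs
      simp [refF, hb, hs]

lemma portA_eq_refF (alpha : List Int) (w : Bool) :
    break_at_descents_py alpha w = refF w alpha := by
  cases alpha with
  | nil => rfl
  | cons a0 rest =>
    rw [break_at_descents_py]
    rw [breakGoA_eq w rest [] [a0] a0 (by simp)]
    obtain ⟨t, r, hs⟩ := refF_struct w a0 rest
    simp [hs]

-- ===== the B side =====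

-- Nat-level break positions: k with a descent between alpha[k] and alpha[k+1]
def breaksK (w : Bool) (l : List Int) : List Nat :=
  (List.range (l.length - 1)).filter (fun k => brkP w (l.getD k 0) (l.getD (k + 1) 0))

-- cut l at an increasing list of positions, starting at a
def chop (l : List Int) : Nat → List Nat → List (List Int)
  | _, [] => []
  | a, b :: bs => ((l.drop a).take (b - a)) :: chop l b bs

def refG (w : Bool) (l : List Int) : List (List Int) :=
  chop l 0 ((breaksK w l).map (· + 1) ++ [l.length])

lemma chop_shift (x : Int) (l : List Int) :
    ∀ (bs : List Nat) (a : Nat), chop (x :: l) (a + 1) (bs.map (· + 1)) = chop l a bs := by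
  intro bs
  induction bs with
  | nil => intro a; rfl
  | cons b bs ih =>
    intro a
    simp only [List.map_cons, chop, List.drop_succ_cons, ih]
    congr 2
    omega

lemma breaksK_cons (w : Bool) (x y : Int) (ys : List Int) :
    breaksK w (x :: y :: ys)
      = (if brkP w x y then [0] else []) ++ (breaksK w (y :: ys)).map (· + 1) := by
  unfold breaksK
  have hlen : (x :: y :: ys).length - 1 = ((y :: ys).length - 1) + 1 := by simp
  rw [hlen, List.range_succ_eq_map, List.filter_cons, List.filter_map]
  have hp : ((fun k => brkP w ((x :: y :: ys).getD k 0) ((x :: y :: ys).getD (k + 1) 0)) ∘ Nat.succ)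
      = fun k => brkP w ((y :: ys).getD k 0) ((y :: ys).getD (k + 1) 0) := by
    funext k
    simp [Function.comp]
  rw [hp]
  have hmap : List.map Nat.succ
      (List.filter (fun k => brkP w ((y :: ys).getD k 0) ((y :: ys).getD (k + 1) 0))
        (List.range ((y :: ys).length - 1)))
      = List.map (· + 1)
      (List.filter (fun k => brkP w ((y :: ys).getD k 0) ((y :: ys).getD (k + 1) 0))
        (List.range ((y :: ys).length - 1))) := by
    simp
  rw [hmap]
  have h0 : brkP w ((x :: y :: ys).getD 0 0) ((x :: y :: ys).getD (0 + 1) 0) = brkP w x y := rfl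
  rw [h0]
  by_cases h : brkP w x y = true <;> simp [h]

lemma refG_cons (w : Bool) (x y : Int) (ys : List Int) :
    refG w (x :: y :: ys)
      = if brkP w x y then [x] :: refG w (y :: ys)
        else (x :: (refG w (y :: ys)).headI) :: (refG w (y :: ys)).tail := by
  unfold refG
  rw [breaksK_cons]
  set ms : List Nat := (breaksK w (y :: ys)).map (· + 1) ++ [(y :: ys).length] with hms
  have hmap : ((if brkP w x y then [0] else [] : List Nat) ++ (breaksK w (y :: ys)).map (· + 1)).map (· + 1)
        ++ [(x :: y :: ys).length]
      = (if brkP w x y then [1] else []) ++ ms.map (· + 1) := by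
    by_cases h : brkP w x y = true <;>
      simp [h, hms, List.map_map, List.length_cons]
  rw [hmap]
  by_cases h : brkP w x y = true
  · rw [if_pos h, if_pos h]
    show chop (x :: y :: ys) 0 (1 :: ms.map (· + 1)) = [x] :: chop (y :: ys) 0 ms
    rw [chop]
    congr 1
    exact chop_shift x (y :: ys) ms 0
  · rw [if_neg h, if_neg h]
    obtain ⟨m, ms', hcons⟩ : ∃ m ms', ms = m :: ms' := by
      cases hb : (breaksK w (y :: ys)).map (· + 1) with
      | nil => exact ⟨(y :: ys).length, [], by simp [hms, hb]⟩
      | cons a l => exact ⟨a, l ++ [(y :: ys).length], by simp [hms, hb]⟩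
    rw [hcons]
    show chop (x :: y :: ys) 0 ((m + 1) :: ms'.map (· + 1))
      = (x :: (chop (y :: ys) 0 (m :: ms')).headI) :: (chop (y :: ys) 0 (m :: ms')).tail
    rw [chop, chop]
    have h1 : chop (x :: y :: ys) (m + 1) (ms'.map (· + 1)) = chop (y :: ys) m ms' :=
      chop_shift x (y :: ys) ms' m
    simp [h1, List.take_succ_cons]

lemma refG_eq_refF (w : Bool) : ∀ (l : List Int), l ≠ [] → refG w l = refF w l := by
  intro l
  induction l with
  | nil => intro h; exact absurd rfl h
  | cons x xs ih =>
    intro _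
    cases xs with
    | nil => simp [refG, refF, breaksK, chop]
    | cons y ys =>
      rw [refG_cons, refF, ih (by simp)]

-- range-over-adjacent-pairs form of chop
lemma chop_idx (l : List Int) : ∀ (bs : List Nat) (a : Nat),
    (List.range bs.length).map (fun j =>
        (l.drop ((a :: bs).getD j 0)).take ((a :: bs).getD (j + 1) 0 - (a :: bs).getD j 0))
      = chop l a bs := by
  intro bs
  induction bs with
  | nil => intro a; rfl
  | cons b bs ih =>
    intro a
    rw [List.length_cons, List.range_succ_eq_map, List.map_cons, List.map_map]
    have hc : ((fun j => (l.drop ((a :: b :: bs).getD j 0)).take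
          ((a :: b :: bs).getD (j + 1) 0 - (a :: b :: bs).getD j 0)) ∘ Nat.succ)
        = fun j => (l.drop ((b :: bs).getD j 0)).take
          ((b :: bs).getD (j + 1) 0 - (b :: bs).getD j 0) := by
      funext j
      simp [Function.comp]
    rw [hc, ih b]
    rfl


lemma breaks_eq (alpha : List Int) (w : Bool) :
    ((PySem.List.pyRange 1 (alpha.length : Int) 1).filter (fun i =>
      PySem.List.pyGetD alpha (i - 1) 0 > PySem.List.pyGetD alpha i 0 ||
      (PySem.List.pyGetD alpha (i - 1) 0 == PySem.List.pyGetD alpha i 0 && w)))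
    = (breaksK w alpha).map (fun k => ((k + 1 : Nat) : Int)) := by
  rw [PySem.List.pyRange_one,
    show (((alpha.length : Int)) - 1).toNat = alpha.length - 1 from by omega,
    List.filter_map]
  unfold breaksK
  have hpred : ((fun i => decide (PySem.List.pyGetD alpha (i - 1) 0 > PySem.List.pyGetD alpha i 0) ||
        (PySem.List.pyGetD alpha (i - 1) 0 == PySem.List.pyGetD alpha i 0 && w)) ∘
        fun k : Nat => (1 : Int) + ↑k)
      = fun k : Nat => brkP w (alpha.getD k 0) (alpha.getD (k + 1) 0) := by
    funext k
    have h1 : (1 : Int) + ↑k - 1 = (k : Int) := by omega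
    have h2 : (1 : Int) + ↑k = ((k + 1 : Nat) : Int) := by push_cast; ring
    have h3 : PySem.List.pyGetD alpha ((k : Int) + 1) 0 = alpha.getD (k + 1) 0 := by
      rw [show ((k : Int) + 1) = ((k + 1 : Nat) : Int) from by push_cast; ring,
        PySem.List.pyGetD_natCast]
    simp [Function.comp, brkP, h2, h3, PySem.List.pyGetD_natCast]
  rw [hpred]
  congr 1
  funext k
  push_cast
  ring

lemma portB_eq_refG (alpha : List Int) (w : Bool) (h : alpha ≠ []) :
    break_at_descents_py_alt alpha w = refG w alpha := by
  rw [break_at_descents_py_alt, if_neg h]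
  simp only [breaks_eq alpha w]
  set bsN : List Nat := (breaksK w alpha).map (· + 1) ++ [alpha.length] with hbsN
  have hbounds : ((0 : Int) :: ((breaksK w alpha).map (fun k => ((k + 1 : Nat) : Int)) ++ [(alpha.length : Int)]))
      = (0 :: bsN).map (fun a : Nat => (a : Int)) := by
    simp [hbsN, List.map_map, Function.comp]
  rw [hbounds]
  rw [PySem.List.pyRange_one]
  have hlen : ((((0 :: bsN).map (fun a : Nat => (a : Int))).length : Int) - 1 - 0).toNat
      = bsN.length := by simp
  rw [hlen, List.map_map]
  have hfun : ((fun j => PySem.List.slice alpha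
        (some (PySem.List.pyGetD ((0 :: bsN).map (fun a : Nat => (a : Int))) j 0))
        (some (PySem.List.pyGetD ((0 :: bsN).map (fun a : Nat => (a : Int))) (j + 1) 0))) ∘
        fun k : Nat => (0 : Int) + ↑k)
      = fun j : Nat => (alpha.drop ((0 :: bsN).getD j 0)).take
          ((0 :: bsN).getD (j + 1) 0 - (0 :: bsN).getD j 0) := by
    funext j
    have e0 : (0 : Int) + (j : Int) = ((j : Nat) : Int) := by ring
    have e1 : (0 : Int) + (j : Int) + 1 = ((j + 1 : Nat) : Int) := by push_cast; ring
    have g : ∀ m : Nat, PySem.List.pyGetD ((0 :: bsN).map (fun a : Nat => (a : Int))) ((m : Nat) : Int) 0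
        = (((0 :: bsN).getD m 0 : Nat) : Int) := by
      intro m
      rw [PySem.List.pyGetD_natCast]
      exact List.getD_map _ 0 _
    simp only [Function.comp]
    rw [e1, e0, g (j + 1), g j]
    exact PySem.List.slice_natCast alpha _ _
  rw [hfun, chop_idx alpha bsN 0]
  rfl

-- ===== VERDICT (by name: the statement is the Claim_ definition above) =====
theorem break_at_descents_py_spec : Claim_equal_break_at_descents_py := by
  intro alpha weak _
  unfold Spec_break_at_descents_py
  cases alpha with
  | nil => rfl
  | cons a0 rest =>
    rw [portA_eq_refF, portB_eq_refG _ _ (by simp), refG_eq_refF _ _ (by simp)]
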